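-- pv_equiv track=rewrite | github.com/tj12323/SGC | third-party/DELTA_densetrack3d/densetrack3d/datasets/tapvid2d_dataset.py | get_chunk_index
-- ===== SOURCE A (Python) =====
-- def get_chunk_index(len_chunks, list_index):
--     cumulative_length = 0
--     for chunk_index, len_chunk in enumerate(len_chunks):
--         # prev_cumulative_length = cumulative_length
--         # cumulative_length += len_chunk
--         if list_index < cumulative_length + len_chunk:
--             local_index = list_index - cumulative_length
--             return chunk_index, local_index
--         else:
--             cumulative_length = cumulative_length + len_chunk
--     return -1, -1
-- ===== SOURCE B (Python) =====
-- from itertools import accumulate, takewhile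
--
--
-- def get_chunk_index(len_chunks, list_index):
--     prefixes = list(accumulate(len_chunks))
--     j = sum(1 for _ in takewhile(lambda p: p <= list_index, prefixes))
--     if j >= len(prefixes):
--         return -1, -1
--     return j, list_index - (prefixes[j - 1] if j > 0 else 0)
-- ===== Notes on version B (the rewrite author's own statement) =====
-- stated objective: alternative
-- what changed: Replaces the early-return scan with a running accumulator by a table formulation: prefix sums built once with itertools.accumulate, the chunk index obtained as the takewhile-count of prefixes not exceeding list_index, and the local index read off the table.
import Mathlib
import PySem

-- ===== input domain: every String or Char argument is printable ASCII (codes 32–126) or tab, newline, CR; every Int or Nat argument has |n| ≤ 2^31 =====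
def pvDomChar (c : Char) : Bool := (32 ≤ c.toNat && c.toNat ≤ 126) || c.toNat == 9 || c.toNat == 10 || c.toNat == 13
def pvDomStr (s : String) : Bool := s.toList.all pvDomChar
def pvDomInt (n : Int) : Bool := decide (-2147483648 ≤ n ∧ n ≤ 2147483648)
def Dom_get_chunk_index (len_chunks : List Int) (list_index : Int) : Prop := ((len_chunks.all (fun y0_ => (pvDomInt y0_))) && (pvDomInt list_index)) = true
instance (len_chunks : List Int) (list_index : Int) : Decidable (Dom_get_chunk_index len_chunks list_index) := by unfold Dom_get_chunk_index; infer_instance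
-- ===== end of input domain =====

-- B replaces A's early-return scan (running accumulator) by a table formulation:
-- prefix sums built once, chunk index = takewhile-count of prefixes ≤ list_index,
-- local index read off the table; an alternative of the same cost.


-- ===== PORT A =====
-- A's loop: running cumulative length, return at the first chunk containing list_index.
def getChunkGoA (len_chunks : List Int) (list_index : Int) (cum : Int) (idx : Int) : Int × Int :=
  match len_chunks with
  | [] => (-1, -1)
  | l :: rest =>
    if list_index < cum + l then (idx, list_index - cum)
    else getChunkGoA rest list_index (cum + l) (idx + 1)

def get_chunk_index (len_chunks : List Int) (list_index : Int) : Int × Int :=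
  getChunkGoA len_chunks list_index 0 0

-- ===== PORT B =====
-- itertools.accumulate: the list of running sums starting from `acc`.
def pvAccum (acc : Int) : List Int → List Int
  | [] => []
  | l :: rest => (acc + l) :: pvAccum (acc + l) rest

-- itertools.takewhile + sum(1 for _ in …) ported as List.takeWhile + length.
def get_chunk_index_alt (len_chunks : List Int) (list_index : Int) : Int × Int :=
  let prefixes := pvAccum 0 len_chunks
  let j := (prefixes.takeWhile (fun p => p ≤ list_index)).length
  if j ≥ prefixes.length then (-1, -1)
  else ((j : Int), list_index - (if j > 0 then prefixes.getD (j - 1) 0 else 0))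

-- ===== PRECONDITION & SPEC =====
def Spec_get_chunk_index (len_chunks : List Int) (list_index : Int) (out : Int × Int) : Prop := out = get_chunk_index_alt len_chunks list_index
instance (len_chunks : List Int) (list_index : Int) (out : Int × Int) : Decidable (Spec_get_chunk_index len_chunks list_index out) := by unfold Spec_get_chunk_index; infer_instance

-- ===== CLAIM (what is proved, stated in full; the proofs are below) =====
def Claim_equal_get_chunk_index : Prop := ∀ (len_chunks : List Int) (list_index : Int), Dom_get_chunk_index len_chunks list_index → Spec_get_chunk_index len_chunks list_index (get_chunk_index len_chunks list_index)

-- ===== LEMMAS AND PROOFS =====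

-- A's scan with accumulator `cum` and counter `idx` computes B's table formula
-- over the prefix sums started at `cum`, with the chunk index shifted by `idx`.
theorem getChunkGoA_char (len_chunks : List Int) (x : Int) : ∀ (cum idx : Int),
    getChunkGoA len_chunks x cum idx =
      (let ps := pvAccum cum len_chunks
       let j := (ps.takeWhile (fun p => p ≤ x)).length
       if j ≥ ps.length then (-1, -1)
       else ((idx + j : Int), x - (if j > 0 then ps.getD (j - 1) 0 else cum))) := by
  induction len_chunks with
  | nil => intro cum idx; simp [getChunkGoA, pvAccum]
  | cons l rest ih =>
    intro cum idx
    simp only [getChunkGoA, pvAccum]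
    by_cases hx : x < cum + l
    · have h1 : ¬ (cum + l ≤ x) := by omega
      simp [h1, hx]
    · have hle : cum + l ≤ x := by omega
      rw [if_neg hx, ih (cum + l) (idx + 1)]
      simp only [List.takeWhile_cons, hle, decide_true, if_true, List.length_cons]
      set ps' := pvAccum (cum + l) rest with hps
      set j' := (ps'.takeWhile (fun p => decide (p ≤ x))).length with hj
      have hj'le : j' ≤ ps'.length := (List.takeWhile_sublist _).length_le
      by_cases hend : j' ≥ ps'.length
      · rw [if_pos hend, if_pos (by omega : j' + 1 ≥ ps'.length + 1)]
      · rw [if_neg hend, if_neg (by omega : ¬ j' + 1 ≥ ps'.length + 1)]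
        rcases Nat.eq_zero_or_pos j' with h0 | h0
        · simp [h0]
        · rw [if_pos (by omega : j' + 1 > 0), if_pos (by omega : j' > 0)]
          rcases j' with _ | m
          · omega
          · simp only [Nat.succ_sub_one, List.getD_cons_succ, Prod.mk.injEq]
            refine ⟨by push_cast; ring, trivial⟩

-- ===== VERDICT (by name: the statement is the Claim_ definition above) =====
theorem get_chunk_index_spec : Claim_equal_get_chunk_index := by
  intro lc x _
  unfold Spec_get_chunk_index get_chunk_index get_chunk_index_alt
  rw [getChunkGoA_char]
  simp
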